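-- pv_equiv track=rewrite | github.com/bolludivyasree/python-programs | code chef/c.py | solve_permutation_problems
-- ===== SOURCE A (Python) =====
-- from collections import defaultdict
--
-- def solve_permutation_problems(test_cases):
--     results = []
--
--     for n, p in test_cases:
--         # Create a dictionary to store the positions of each number
--         pos = defaultdict(list)
--         for i in range(n):
--             pos[p[i]].append(i + 1)
--
--         count = 0
--         # Check pairs (i, j) where 1 <= i < j <= n
--         for i in range(1, n + 1):
--             for j in range(i * 2, n + 1, i):
--                 # Only valid pairs (i, j) where j is a multiple of i
--                 if i < j and (p[i - 1] * p[j - 1]) % (i * j) == 0: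
--                     count += 1
--
--         results.append(count)
--
--     return results
-- ===== SOURCE B (Python) =====
-- def solve_permutation_problems(test_cases):
--     # Per test case: walk j upward and discover each j's proper divisors i by
--     # trial division, instead of sieving multiples of each i as A does.
--     results = []
--     for n, p in test_cases:
--         count = 0
--         for j in range(2, n + 1):
--             pj = p[j - 1]
--             for i in range(1, j):
--                 if j % i == 0 and (p[i - 1] * pj) % (i * j) == 0:
--                     count += 1
--         results.append(count)
--     return results
-- ===== Notes on version B (the rewrite author's own statement) =====
-- stated objective: alternative
-- what changed: B counts the same pairs by iterating j and discovering its proper divisors i by trial division (j % i == 0) instead of A's sieve over the multiples of each i, and drops A's unused pos dictionary.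
import Mathlib
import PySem

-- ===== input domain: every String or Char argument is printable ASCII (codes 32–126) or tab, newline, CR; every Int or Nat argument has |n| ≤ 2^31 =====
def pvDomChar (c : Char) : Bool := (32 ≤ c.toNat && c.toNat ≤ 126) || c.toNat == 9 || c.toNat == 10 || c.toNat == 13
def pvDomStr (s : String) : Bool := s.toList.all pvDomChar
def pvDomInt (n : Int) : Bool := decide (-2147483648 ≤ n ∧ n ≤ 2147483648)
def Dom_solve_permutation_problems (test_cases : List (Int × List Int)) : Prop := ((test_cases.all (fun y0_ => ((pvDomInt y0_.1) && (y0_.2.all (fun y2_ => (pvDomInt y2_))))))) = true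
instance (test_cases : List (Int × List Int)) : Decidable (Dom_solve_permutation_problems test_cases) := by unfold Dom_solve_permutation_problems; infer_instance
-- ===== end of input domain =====

-- B counts the same divisor pairs by trial division per j instead of A's sieve over multiples of each i (alternative decomposition, not faster); A's unused pos dictionary is dropped.


-- ===== PORT A =====
def solve_permutation_problems (test_cases : List (Int × List Int)) : List Int :=
  test_cases.foldl (fun results c =>
    let n := c.1
    let p := c.2
    -- pos = defaultdict(list); for i in range(n): pos[p[i]].append(i+1)   (unused, kept literally)
    let _pos : PySem.Dict Int (List Int) :=
      (PySem.List.pyRange 0 n 1).foldl (fun d i =>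
        let k := PySem.List.pyGetD p i 0
        d.insert k (d.getD k [] ++ [i + 1])) PySem.Dict.empty
    let count : Int :=
      (PySem.List.pyRange 1 (n + 1) 1).foldl (fun cnt i =>
        (PySem.List.pyRange (i * 2) (n + 1) i).foldl (fun cnt j =>
          if i < j ∧ PySem.Int.mod (PySem.List.pyGetD p (i - 1) 0 * PySem.List.pyGetD p (j - 1) 0) (i * j) = 0
          then cnt + 1 else cnt) cnt) 0
    results ++ [count]) []

-- ===== PORT B =====
def solve_permutation_problems_alt (test_cases : List (Int × List Int)) : List Int :=
  test_cases.foldl (fun results c =>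
    let n := c.1
    let p := c.2
    let count : Int :=
      (PySem.List.pyRange 2 (n + 1) 1).foldl (fun cnt j =>
        let pj := PySem.List.pyGetD p (j - 1) 0
        (PySem.List.pyRange 1 j 1).foldl (fun cnt i =>
          if PySem.Int.mod j i = 0 ∧ PySem.Int.mod (PySem.List.pyGetD p (i - 1) 0 * pj) (i * j) = 0
          then cnt + 1 else cnt) cnt) 0
    results ++ [count]) []

-- ===== PRECONDITION & SPEC =====
-- Pre_: A raises IndexError (building pos) when some test case has n > len(p); exactly those inputs are excluded.
def Pre_solve_permutation_problems (test_cases : List (Int × List Int)) : Prop :=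
  ∀ c ∈ test_cases, c.1 ≤ (c.2.length : Int)
instance (test_cases : List (Int × List Int)) : Decidable (Pre_solve_permutation_problems test_cases) := by unfold Pre_solve_permutation_problems; infer_instance
def pvWitness_solve_permutation_problems : (List (Int × List Int)) := [(3, [2, 1, 3]), (1, [1])]

def Spec_solve_permutation_problems (test_cases : List (Int × List Int)) (out : List Int) : Prop := out = solve_permutation_problems_alt test_cases
instance (test_cases : List (Int × List Int)) (out : List Int) : Decidable (Spec_solve_permutation_problems test_cases out) := by unfold Spec_solve_permutation_problems; infer_instance

-- ===== CLAIM (what is proved, stated in full; the proofs are below) =====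
def Claim_equal_solve_permutation_problems : Prop := ∀ (test_cases : List (Int × List Int)), Dom_solve_permutation_problems test_cases → Pre_solve_permutation_problems test_cases → Spec_solve_permutation_problems test_cases (solve_permutation_problems test_cases)

-- ===== LEMMAS AND PROOFS =====

-- turn the counting folds into sums of 0/1 maps
theorem pvFoldlIteAdd {α : Type} (P : α → Prop) [DecidablePred P] (l : List α) (a : Int) :
    l.foldl (fun c x => if P x then c + 1 else c) a
      = a + (l.map (fun x => if P x then (1 : Int) else 0)).sum := by
  induction l generalizing a with
  | nil => simp
  | cons x xs ih => simp only [List.foldl_cons, List.map_cons, List.sum_cons, ih]; split_ifs <;> ring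

-- split range(a, b+1, s) (0 < s) at its possible last element b
theorem pvPyRangeNilPos (a b s : Int) (hs : 0 < s) (h : b ≤ a) : PySem.List.pyRange a b s = [] := by
  rw [PySem.List.pyRange_of_pos a b hs, if_neg (by omega)]
  simp

theorem pvDivSmall (s q r : Int) (hs : 0 < s) (h0 : 0 ≤ r) (hrs : r < s) :
    (s * q + r) / s = q := by
  have h : s * q + r = r + q * s := by ring
  rw [h, Int.add_mul_ediv_right _ _ (by omega : s ≠ 0), Int.ediv_eq_zero_of_lt h0 hrs]
  omega

theorem pvPyRangeSuccRightPos (a b s : Int) (hs : 0 < s) :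
    PySem.List.pyRange a (b + 1) s
      = PySem.List.pyRange a b s ++ (if a ≤ b ∧ s ∣ (b - a) then [b] else []) := by
  by_cases hab : a ≤ b
  · rw [PySem.List.pyRange_of_pos a (b + 1) hs, PySem.List.pyRange_of_pos a b hs]
    by_cases hdvd : s ∣ (b - a)
    · obtain ⟨q, hq⟩ := hdvd
      have hq0 : 0 ≤ q := by nlinarith
      have hmul : s * (q + 1) = s * q + s := by ring
      have h1 : b + 1 - a + s - 1 = s * (q + 1) + 0 := by omega
      have h2 : (b + 1 - a + s - 1) / s = q + 1 := by
        rw [h1]; exact pvDivSmall s (q + 1) 0 hs le_rfl hs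
      have h3 : (if a < b + 1 then ((b + 1 - a + s - 1) / s).toNat else 0) = q.toNat + 1 := by
        rw [if_pos (by omega), h2]; omega
      have h4 : (if a < b then ((b - a + s - 1) / s).toNat else 0) = q.toNat := by
        by_cases hab' : a < b
        · have e : b - a + s - 1 = s * q + (s - 1) := by omega
          rw [if_pos hab', e, pvDivSmall s q (s - 1) hs (by omega) (by omega)]
        · have hz : s * q = 0 := by omega
          have : q = 0 := by
            rcases mul_eq_zero.mp hz with h | h
            · omega
            · exact h
          rw [if_neg hab']; omega
      rw [h3, h4, if_pos ⟨hab, ⟨q, hq⟩⟩, List.range_succ, List.map_append, List.map_singleton]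
      congr 2
      have hc : ((q.toNat : Int)) = q := by omega
      rw [hc]; omega
    · have hq0 : 0 ≤ (b - a) / s := Int.ediv_nonneg (by omega) (by omega)
      have hkey : s * ((b - a) / s) + (b - a) % s = b - a := Int.ediv_add_emod (b - a) s
      have hr0 : 0 < (b - a) % s := by
        rcases lt_or_eq_of_le (Int.emod_nonneg (b - a) (by omega : s ≠ 0)) with h | h
        · exact h
        · exact absurd (Int.dvd_of_emod_eq_zero h.symm) hdvd
      have hrs : (b - a) % s < s := Int.emod_lt_of_pos _ hs
      set q := (b - a) / s with hqdef
      set r := (b - a) % s with hrdef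
      have hmul : s * (q + 1) = s * q + s := by ring
      have hsq : 0 ≤ s * q := mul_nonneg (by omega) hq0
      have e1 : b + 1 - a + s - 1 = s * (q + 1) + r := by omega
      have e2 : b - a + s - 1 = s * (q + 1) + (r - 1) := by omega
      have d1 : (b + 1 - a + s - 1) / s = q + 1 := by
        rw [e1]; exact pvDivSmall s (q + 1) r hs (by omega) (by omega)
      have d2 : (b - a + s - 1) / s = q + 1 := by
        rw [e2]; exact pvDivSmall s (q + 1) (r - 1) hs (by omega) (by omega)
      rw [if_pos (show a < b + 1 by omega), if_pos (show a < b by omega), d1, d2,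
        if_neg (show ¬(a ≤ b ∧ s ∣ (b - a)) from fun h => hdvd h.2), List.append_nil]
  · rw [pvPyRangeNilPos a b s hs (by omega), pvPyRangeNilPos a (b + 1) s hs (by omega),
      if_neg (show ¬(a ≤ b ∧ s ∣ (b - a)) from fun h => hab h.1)]
    simp

-- the inner-count abbreviations
def pvWA (p : List Int) (b i : Int) : Int :=
  ((PySem.List.pyRange (i * 2) b i).map (fun j =>
    if i < j ∧ PySem.Int.mod (PySem.List.pyGetD p (i - 1) 0 * PySem.List.pyGetD p (j - 1) 0) (i * j) = 0
    then (1 : Int) else 0)).sum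

def pvWB (p : List Int) (j : Int) : Int :=
  ((PySem.List.pyRange 1 j 1).map (fun i =>
    if PySem.Int.mod j i = 0 ∧ PySem.Int.mod (PySem.List.pyGetD p (i - 1) 0 * PySem.List.pyGetD p (j - 1) 0) (i * j) = 0
    then (1 : Int) else 0)).sum

def pvAC (p : List Int) (n : Int) : Int := ((PySem.List.pyRange 1 (n + 1) 1).map (pvWA p (n + 1))).sum
def pvBC (p : List Int) (n : Int) : Int := ((PySem.List.pyRange 2 (n + 1) 1).map (pvWB p)).sum

theorem pvA_count_eq (p : List Int) (n : Int) :
    (PySem.List.pyRange 1 (n + 1) 1).foldl (fun cnt i =>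
        (PySem.List.pyRange (i * 2) (n + 1) i).foldl (fun cnt j =>
          if i < j ∧ PySem.Int.mod (PySem.List.pyGetD p (i - 1) 0 * PySem.List.pyGetD p (j - 1) 0) (i * j) = 0
          then cnt + 1 else cnt) cnt) 0 = pvAC p n := by
  rw [PySem.List.foldl_congr_mem _ _ (fun cnt i => cnt + pvWA p (n + 1) i) _
    (fun acc x _ => pvFoldlIteAdd _ _ acc), PySem.List.foldl_add]
  simp [pvAC]

theorem pvB_count_eq (p : List Int) (n : Int) :
    (PySem.List.pyRange 2 (n + 1) 1).foldl (fun cnt j =>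
        (PySem.List.pyRange 1 j 1).foldl (fun cnt i =>
          if PySem.Int.mod j i = 0 ∧ PySem.Int.mod (PySem.List.pyGetD p (i - 1) 0 * PySem.List.pyGetD p (j - 1) 0) (i * j) = 0
          then cnt + 1 else cnt) cnt) 0 = pvBC p n := by
  rw [PySem.List.foldl_congr_mem _ _ (fun cnt j => cnt + pvWB p j) _
    (fun acc x _ => pvFoldlIteAdd _ _ acc), PySem.List.foldl_add]
  simp [pvBC]

-- a proper divisor i of m (1 ≤ i < m) satisfies 2 i ≤ m
theorem pvTwoMulLe {i m : Int} (h1 : 1 ≤ i) (h2 : i < m) (hd : i ∣ m) : i * 2 ≤ m := by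
  obtain ⟨q, hq⟩ := hd
  have hq2 : 2 ≤ q := by nlinarith
  nlinarith

-- the main identity: both double loops count the same set of pairs
theorem pvMain (p : List Int) (n : Int) : pvAC p n = pvBC p n := by
  by_cases hn : n < 1
  · rw [pvAC, pvBC, PySem.List.pyRange_one_eq_nil (by omega), PySem.List.pyRange_one_eq_nil (by omega)]
    simp
  · rw [not_lt] at hn
    obtain ⟨m, rfl⟩ : ∃ m : Nat, n = (m : Int) := ⟨n.toNat, by omega⟩
    clear hn
    induction m with
    | zero =>
      rw [pvAC, pvBC, PySem.List.pyRange_one_eq_nil (by omega), PySem.List.pyRange_one_eq_nil (by omega)]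
      simp
    | succ m ih =>
      have hcast : ((m + 1 : Nat) : Int) = (m : Int) + 1 := by push_cast; ring
      rw [hcast]
      have hA : pvAC p ((m : Int) + 1)
          = pvAC p (m : Int) + ((PySem.List.pyRange 1 ((m : Int) + 1) 1).map (fun i =>
              if (i * 2 ≤ (m : Int) + 1 ∧ i ∣ ((m : Int) + 1 - i * 2)) ∧ (i < (m : Int) + 1 ∧
                 PySem.Int.mod (PySem.List.pyGetD p (i - 1) 0 * PySem.List.pyGetD p ((m : Int) + 1 - 1) 0) (i * ((m : Int) + 1)) = 0)
              then (1 : Int) else 0)).sum := by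
        unfold pvAC
        rw [PySem.List.pyRange_one_succ_right (show (1 : Int) ≤ (m : Int) + 1 by omega),
          List.map_append, List.sum_append, List.map_singleton]
        have hlast : pvWA p ((m : Int) + 1 + 1) ((m : Int) + 1) = 0 := by
          unfold pvWA
          rw [pvPyRangeNilPos _ _ _ (by omega) (by omega)]
          simp
        rw [hlast]
        simp only [List.sum_cons, List.sum_nil, add_zero]
        rw [← PySem.List.sum_map_add_int]
        exact congrArg _ (List.map_congr_left (by
          intro i hi
          rw [PySem.List.mem_pyRange_one] at hi
          unfold pvWA
          rw [pvPyRangeSuccRightPos _ _ _ (show (0 : Int) < i by omega),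
            List.map_append, List.sum_append]
          congr 1
          by_cases hc : i * 2 ≤ (m : Int) + 1 ∧ i ∣ ((m : Int) + 1 - i * 2)
          · rw [if_pos hc, List.map_singleton]
            by_cases hd : i < (m : Int) + 1 ∧
                PySem.Int.mod (PySem.List.pyGetD p (i - 1) 0 * PySem.List.pyGetD p ((m : Int) + 1 - 1) 0) (i * ((m : Int) + 1)) = 0
            · rw [if_pos hd, if_pos ⟨hc, hd⟩]; simp
            · rw [if_neg hd, if_neg (fun h => hd h.2)]; simp
          · rw [if_neg hc, if_neg (fun h => hc h.1)]
            simp))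
      have hB : pvBC p ((m : Int) + 1)
          = pvBC p (m : Int) + ((PySem.List.pyRange 1 ((m : Int) + 1) 1).map (fun i =>
              if PySem.Int.mod ((m : Int) + 1) i = 0 ∧
                 PySem.Int.mod (PySem.List.pyGetD p (i - 1) 0 * PySem.List.pyGetD p ((m : Int) + 1 - 1) 0) (i * ((m : Int) + 1)) = 0
              then (1 : Int) else 0)).sum := by
        by_cases hm : m = 0
        · subst hm
          rw [pvBC, pvBC, pvPyRangeNilPos 2 _ 1 (by omega) (by omega),
            pvPyRangeNilPos 2 _ 1 (by omega) (by omega),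
            PySem.List.pyRange_one_eq_nil (by omega)]
          simp
        · unfold pvBC
          rw [PySem.List.pyRange_one_succ_right (show (2 : Int) ≤ (m : Int) + 1 by omega),
            List.map_append, List.sum_append, List.map_singleton]
          congr 1
          unfold pvWB
          simp
      rw [hA, hB, ih]
      congr 1
      refine congrArg _ (List.map_congr_left ?_)
      intro i hi
      rw [PySem.List.mem_pyRange_one] at hi
      have hmod : PySem.Int.mod ((m : Int) + 1) i = 0 ↔ i ∣ ((m : Int) + 1) :=
        PySem.Int.mod_eq_zero_iff_dvd _ _
      have hdvd_iff : i ∣ ((m : Int) + 1 - i * 2) ↔ i ∣ ((m : Int) + 1) := by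
        constructor
        · intro h; have := dvd_add h (Dvd.intro 2 rfl); simpa using this
        · intro h; exact dvd_sub h (Dvd.intro 2 rfl)
      split_ifs with h1 h2 h2
      · rfl
      · exact absurd ⟨hmod.mpr (hdvd_iff.mp h1.1.2), h1.2.2⟩ h2
      · obtain ⟨hm, hD⟩ := h2
        have hd : i ∣ ((m : Int) + 1) := hmod.mp hm
        exact absurd ⟨⟨pvTwoMulLe (by omega) (by omega) hd, hdvd_iff.mpr hd⟩, by omega, hD⟩ h1
      · rfl

-- ===== VERDICT (by name: the statement is the Claim_ definition above) =====
theorem solve_permutation_problems_spec : Claim_equal_solve_permutation_problems := by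
  intro test_cases _ _
  unfold Spec_solve_permutation_problems
  have h1 : solve_permutation_problems test_cases
      = test_cases.foldl (fun results c => results ++ [pvAC c.2 c.1]) [] := by
    unfold solve_permutation_problems
    refine PySem.List.foldl_congr_mem _ _ _ _ ?_
    intro acc c _
    show acc ++ [_] = acc ++ [pvAC c.2 c.1]
    rw [pvA_count_eq]
  have h2 : solve_permutation_problems_alt test_cases
      = test_cases.foldl (fun results c => results ++ [pvAC c.2 c.1]) [] := by
    unfold solve_permutation_problems_alt
    refine PySem.List.foldl_congr_mem _ _ _ _ ?_
    intro acc c _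
    show acc ++ [_] = acc ++ [pvAC c.2 c.1]
    rw [pvB_count_eq, pvMain]
  rw [h1, h2]
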